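-- pv_equiv track=rewrite | github.com/dysnpv/Chinese_Word_Segmentation | BSME.py | convert_BSME_train
-- ===== SOURCE A (Python) =====
-- def convert_BSME_train(y):
--     BSME_y = []
--     for i in range(len(y)):
--         BSME_y.append([])
--         B_before = False
--         for j in range(len(y[i])):
--             if B_before:
--                 if y[i][j] == True:
--                     BSME_y[i].append(3)
--                     B_before = False
--                 else:
--                     BSME_y[i].append(2)
--             else:
--                 if y[i][j] == True:
--                     BSME_y[i].append(0)
--                 else:
--                     BSME_y[i].append(1)
--                     B_before = True
--     return BSME_y
-- ===== SOURCE B (Python) =====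
-- def convert_BSME_train(y):
--     # Run-length decomposition: scan each sequence as maximal runs of equal
--     # labels and emit each run's whole tag block at once:
--     # a False-run yields [1] + [2]*(len-1); a True-run yields all 0s, except
--     # that its first element gets 3 when the run is not at the start
--     # (it is then necessarily preceded by a False).
--     out = []
--     for seq in y:
--         tags = []
--         j, n = 0, len(seq)
--         while j < n:
--             k = j + 1
--             while k < n and (seq[k] == True) == (seq[j] == True):
--                 k += 1
--             if seq[j] == True:
--                 tags += ([0] if j == 0 else [3]) + [0] * (k - j - 1)
--             else:
--                 tags += [1] + [2] * (k - j - 1)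
--             j = k
--         out.append(tags)
--     return out
-- ===== Notes on version B (the rewrite author's own statement) =====
-- stated objective: alternative
-- what changed: Replaces A's per-element state machine (carried B_before flag) by a run-length scan: a two-pointer inner loop finds each maximal run of equal labels and emits that run's whole tag block at once ([1]+[2]*(k-1) for a False run, 3-or-0 head plus 0s for a True run).
import Mathlib
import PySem

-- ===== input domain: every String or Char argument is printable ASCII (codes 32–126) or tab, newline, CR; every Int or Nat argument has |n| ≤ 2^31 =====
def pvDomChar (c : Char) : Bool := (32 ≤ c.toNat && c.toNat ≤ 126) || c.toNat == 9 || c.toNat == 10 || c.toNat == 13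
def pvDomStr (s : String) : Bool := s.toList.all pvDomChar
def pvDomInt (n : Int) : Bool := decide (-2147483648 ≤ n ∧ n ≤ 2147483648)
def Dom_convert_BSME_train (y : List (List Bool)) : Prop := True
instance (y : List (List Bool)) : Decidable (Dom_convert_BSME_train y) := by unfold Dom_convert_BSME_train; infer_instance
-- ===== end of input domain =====

-- B replaces A's per-element state machine by a run-length scan emitting whole tag
-- blocks per maximal run of equal labels; objective: alternative decomposition.

-- ===== PORT A =====
-- inner loop of A: state is (row built so far, B_before)
def pvStepA (st : List Int × Bool) (b : Bool) : List Int × Bool :=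
  if st.2 then
    (if b = true then (st.1 ++ [3], false) else (st.1 ++ [2], st.2))
  else
    (if b = true then (st.1 ++ [0], st.2) else (st.1 ++ [1], true))

def convert_BSME_train (y : List (List Bool)) : List (List Int) :=
  y.foldl (fun acc row => acc ++ [(row.foldl pvStepA ([], false)).1]) []

-- ===== PORT B =====
-- inner while-loop of Source B: consume one maximal run of labels equal (under ==True)
-- to the run's first element, emit its whole tag block, recurse on the rest;
-- atStart tracks Source B's `j == 0` test, takeWhile/dropWhile are the inner k-scan.
def pvGoB (atStart : Bool) (seq : List Bool) : List Int :=
  match seq with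
  | [] => []
  | c :: rest =>
    (if c == true then
        (if atStart then [0] else [3])
          ++ List.replicate (rest.takeWhile (fun x => (x == true) == (c == true))).length 0
     else [1] ++ List.replicate (rest.takeWhile (fun x => (x == true) == (c == true))).length 2)
      ++ pvGoB false (rest.dropWhile (fun x => (x == true) == (c == true)))
termination_by seq.length
decreasing_by
  simp only [List.length_cons]
  have := List.length_dropWhile_le (fun x => (x == true) == (c == true)) rest
  omega

def convert_BSME_train_alt (y : List (List Bool)) : List (List Int) :=
  y.map (fun seq => pvGoB true seq)

-- ===== PRECONDITION & SPEC =====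
def Spec_convert_BSME_train (y : List (List Bool)) (out : List (List Int)) : Prop := out = convert_BSME_train_alt y
instance (y : List (List Bool)) (out : List (List Int)) : Decidable (Spec_convert_BSME_train y out) := by unfold Spec_convert_BSME_train; infer_instance

-- ===== CLAIM (what is proved, stated in full; the proofs are below) =====
def Claim_equal_convert_BSME_train : Prop := ∀ (y : List (List Bool)), Dom_convert_BSME_train y → Spec_convert_BSME_train y (convert_BSME_train y)

-- ===== LEMMAS AND PROOFS =====

-- A's inner loop as a structural recursion (the state after an element is always !element)
def pvTagsA (bb : Bool) : List Bool → List Int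
  | [] => []
  | c :: tl => (if bb then (if c = true then 3 else 2) else (if c = true then 0 else 1)) :: pvTagsA (!c) tl

theorem pv_foldl_tagsA (seq : List Bool) : ∀ (acc : List Int) (bb : Bool),
    (seq.foldl pvStepA (acc, bb)).1 = acc ++ pvTagsA bb seq := by
  induction seq with
  | nil => intro acc bb; simp [pvTagsA]
  | cons c tl ih =>
    intro acc bb
    have hstep : pvStepA (acc, bb) c
        = (acc ++ [if bb then (if c = true then 3 else 2) else (if c = true then 0 else 1)], !c) := by
      cases bb <;> cases c <;> simp [pvStepA]
    simp [List.foldl_cons, hstep, ih, pvTagsA]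

theorem pv_pred_eq (c : Bool) : (fun x => ((x == true) == (c == true))) = (fun x => x == c) := by
  funext x; cases c <;> cases x <;> decide

-- a run of n copies of c, entered with state !c, yields n equal tags and keeps the state
theorem pv_run (n : ℕ) (c : Bool) (tl : List Bool) :
    pvTagsA (!c) (List.replicate n c ++ tl)
      = List.replicate n (if c = true then (0 : Int) else 2) ++ pvTagsA (!c) tl := by
  induction n with
  | zero => simp
  | succ m ih =>
    rw [List.replicate_succ, List.replicate_succ, List.cons_append, List.cons_append]
    cases c
    · show (2 : Int) :: pvTagsA (!false) (List.replicate m false ++ tl) = _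
      rw [ih]; simp
    · show (0 : Int) :: pvTagsA (!true) (List.replicate m true ++ tl) = _
      rw [ih]; simp

theorem pv_head_dropWhile {p : Bool → Bool} : ∀ (l : List Bool) (h : Bool),
    (l.dropWhile p).head? = some h → p h = false := by
  intro l
  induction l with
  | nil => intro h hh; simp [List.dropWhile] at hh
  | cons a tl ih =>
    intro h hh
    cases hpa : p a with
    | true => exact ih h (by simpa [List.dropWhile, hpa] using hh)
    | false =>
      simp [List.dropWhile, hpa] at hh
      exact hh ▸ hpa

theorem pv_takeWhile_rep (c : Bool) (l : List Bool) :
    l.takeWhile (fun x => x == c) = List.replicate (l.takeWhile (fun x => x == c)).length c := by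
  apply List.eq_replicate_of_mem
  intro b hb
  have := List.mem_takeWhile_imp hb
  simpa using this

theorem pv_goB_eq (s : Bool) (c : Bool) (tl : List Bool) :
    pvGoB s (c :: tl)
      = (if c = true then (if s then [0] else [3])
            ++ List.replicate (tl.takeWhile (fun x => x == c)).length (0 : Int)
         else [1] ++ List.replicate (tl.takeWhile (fun x => x == c)).length (2 : Int))
        ++ pvGoB false (tl.dropWhile (fun x => x == c)) := by
  rw [pvGoB]
  rw [pv_pred_eq c]
  cases c <;> simp

theorem pv_main : ∀ (n : ℕ) (seq : List Bool), seq.length ≤ n →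
    (pvTagsA false seq = pvGoB true seq) ∧
    (∀ c0 : Bool, (∀ h, seq.head? = some h → h ≠ c0) → pvTagsA (!c0) seq = pvGoB false seq) := by
  intro n
  induction n with
  | zero =>
    intro seq hl
    have : seq = [] := List.eq_nil_of_length_eq_zero (Nat.le_zero.mp hl)
    subst this
    exact ⟨by simp [pvTagsA, pvGoB], fun _ _ => by simp [pvTagsA, pvGoB]⟩
  | succ m ih =>
    intro seq hl
    cases seq with
    | nil => exact ⟨by simp [pvTagsA, pvGoB], fun _ _ => by simp [pvTagsA, pvGoB]⟩
    | cons c tl =>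
      have htl : tl.takeWhile (fun x => x == c) ++ tl.dropWhile (fun x => x == c) = tl :=
        List.takeWhile_append_dropWhile
      have hlen : (tl.dropWhile (fun x => x == c)).length ≤ m := by
        have h1 := List.length_dropWhile_le (fun x => x == c) tl
        simp only [List.length_cons] at hl
        omega
      have hhead : ∀ h, (tl.dropWhile (fun x => x == c)).head? = some h → h ≠ c := by
        intro h hh hc
        have := pv_head_dropWhile (p := fun x => x == c) tl h hh
        simp [hc] at this
      have hbody : pvTagsA (!c) tl
          = List.replicate (tl.takeWhile (fun x => x == c)).length (if c = true then (0 : Int) else 2)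
            ++ pvGoB false (tl.dropWhile (fun x => x == c)) := by
        conv_lhs => rw [← htl, pv_takeWhile_rep c tl]
        rw [pv_run]
        rw [(ih _ hlen).2 c hhead]
      constructor
      · -- entered with bb = false (start of sequence)
        rw [pv_goB_eq true c tl]
        show (if c = true then (0:Int) else 1) :: pvTagsA (!c) tl = _
        rw [hbody]
        cases c <;> simp
      · intro c0 hne
        have hc0 : c0 = !c := by
          have := hne c rfl
          cases c <;> cases c0 <;> simp_all
        subst hc0
        rw [pv_goB_eq false c tl]
        show (if (!!c) then (if c = true then (3:Int) else 2) else (if c = true then 0 else 1))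
              :: pvTagsA (!c) tl = _
        rw [hbody]
        cases c <;> simp

theorem pv_row (seq : List Bool) : (seq.foldl pvStepA ([], false)).1 = pvGoB true seq := by
  rw [pv_foldl_tagsA seq [] false]
  simpa using (pv_main seq.length seq le_rfl).1

theorem pv_outer (y : List (List Bool)) : ∀ (acc : List (List Int)),
    y.foldl (fun acc row => acc ++ [(row.foldl pvStepA ([], false)).1]) acc
      = acc ++ y.map (fun seq => pvGoB true seq) := by
  induction y with
  | nil => intro acc; simp
  | cons r tl ih =>
    intro acc
    rw [List.foldl_cons, ih]
    simp [pv_row]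

-- ===== VERDICT (by name: the statement is the Claim_ definition above) =====
theorem convert_BSME_train_spec : Claim_equal_convert_BSME_train := by
  intro y _
  unfold Spec_convert_BSME_train convert_BSME_train convert_BSME_train_alt
  simpa using pv_outer y []
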